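-- pv_equiv track=rewrite | github.com/fandango-fuzzer/fandango | src/fandango/io/navigation/pathutils.py | find_longest_suffix
-- ===== SOURCE A (Python) =====
-- def find_longest_suffix(path, suffix_path):
--     max_overlap = 0
--     search_len = len(suffix_path)
--     chain_len = len(path)
--     for i in range(1, min(search_len, chain_len) + 1):
--         if path[-i:] == suffix_path[:i]:
--             max_overlap = i
--     return suffix_path[:max_overlap]
-- ===== SOURCE B (Python) =====
-- def find_longest_suffix(path, suffix_path):
--     t = path[len(path) - min(len(path), len(suffix_path)):]
--     while t:
--         if suffix_path[:len(t)] == t: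
--             return t
--         t = t[1:]
--     return t
-- ===== Notes on version B (the rewrite author's own statement) =====
-- stated objective: faster
-- what changed: B replaces A's full scan over all candidate lengths (keeping the maximum) by trimming path to its last min(len) elements and shrinking that suffix one element at a time, returning at the first (hence longest) suffix that is a prefix of suffix_path.
import Mathlib
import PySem

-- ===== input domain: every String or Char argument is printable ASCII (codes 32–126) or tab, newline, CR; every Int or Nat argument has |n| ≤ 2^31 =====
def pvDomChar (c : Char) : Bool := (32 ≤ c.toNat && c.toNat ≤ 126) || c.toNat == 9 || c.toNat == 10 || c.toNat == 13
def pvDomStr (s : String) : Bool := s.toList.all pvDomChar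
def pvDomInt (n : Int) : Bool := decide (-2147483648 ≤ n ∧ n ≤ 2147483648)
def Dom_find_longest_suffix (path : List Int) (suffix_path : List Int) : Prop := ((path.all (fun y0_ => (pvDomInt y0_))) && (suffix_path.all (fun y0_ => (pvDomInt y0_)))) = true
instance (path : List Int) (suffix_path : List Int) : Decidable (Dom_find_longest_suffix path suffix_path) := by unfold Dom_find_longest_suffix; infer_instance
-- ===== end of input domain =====

-- B trims path to its last min(len) elements and shrinks that suffix one element at a time,
-- returning the first (longest) suffix that is a prefix of suffix_path; simpler than A's full
-- scan over all lengths keeping the maximum.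

-- ===== PORT A =====
def find_longest_suffix (path : List Int) (suffix_path : List Int) : List Int :=
  let search_len : Int := suffix_path.length
  let chain_len : Int := path.length
  let max_overlap : Int :=
    (PySem.List.pyRange 1 (min search_len chain_len + 1) 1).foldl
      (fun acc i =>
        if PySem.List.slice path (some (-i)) none = PySem.List.slice suffix_path none (some i)
        then i else acc) 0
  PySem.List.slice suffix_path none (some max_overlap)

-- ===== PORT B =====
-- the while loop of Source B: shrink t from the front until it is a prefix of suffix_path
def flsGo (sp : List Int) : List Int → List Int
  | [] => []
  | a :: rest => if sp.take (a :: rest).length = a :: rest then a :: rest else flsGo sp rest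

def find_longest_suffix_alt (path : List Int) (suffix_path : List Int) : List Int :=
  flsGo suffix_path (path.drop (path.length - min path.length suffix_path.length))

-- ===== PRECONDITION & SPEC =====
def Spec_find_longest_suffix (path : List Int) (suffix_path : List Int) (out : List Int) : Prop := out = find_longest_suffix_alt path suffix_path
instance (path : List Int) (suffix_path : List Int) (out : List Int) : Decidable (Spec_find_longest_suffix path suffix_path out) := by unfold Spec_find_longest_suffix; infer_instance

-- ===== CLAIM (what is proved, stated in full; the proofs are below) =====
def Claim_equal_find_longest_suffix : Prop := ∀ (path : List Int) (suffix_path : List Int), Dom_find_longest_suffix path suffix_path → Spec_find_longest_suffix path suffix_path (find_longest_suffix path suffix_path)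

-- ===== LEMMAS AND PROOFS =====

-- A's fold over range(1, k+1) is nonnegative and, via take, computes exactly B's flsGo on the
-- length-k suffix of path.
theorem fls_key (path sp : List Int) (k : Nat) (hp : k ≤ path.length) (hs : k ≤ sp.length) :
    0 ≤ (PySem.List.pyRange 1 ((k : Int) + 1) 1).foldl
      (fun acc i =>
        if PySem.List.slice path (some (-i)) none = PySem.List.slice sp none (some i)
        then i else acc) 0 ∧
    sp.take ((PySem.List.pyRange 1 ((k : Int) + 1) 1).foldl
      (fun acc i =>
        if PySem.List.slice path (some (-i)) none = PySem.List.slice sp none (some i)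
        then i else acc) 0).toNat = flsGo sp (path.drop (path.length - k)) := by
  induction k with
  | zero =>
      rw [show ((0:Nat):Int) + 1 = 1 by norm_num,
        PySem.List.pyRange_one_eq_nil (by norm_num)]
      simp [flsGo]
  | succ k ih =>
      obtain ⟨ih0, ih1⟩ := ih (by omega) (by omega)
      push_cast
      rw [PySem.List.pyRange_one_succ_right (by omega : (1:Int) ≤ (k:Int) + 1),
        List.foldl_append]
      simp only [List.foldl_cons, List.foldl_nil]
      have hneg : PySem.List.slice path (some (-((k:Int) + 1))) none
          = path.drop (path.length - (k+1)) := by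
        have := PySem.List.slice_from_neg_natCast path (k+1) (by omega)
        push_cast at this
        exact this
      have hto : PySem.List.slice sp none (some ((k:Int) + 1)) = sp.take (k+1) := by
        have := PySem.List.slice_to_natCast sp (k+1)
        push_cast at this
        exact this
      rw [hneg, hto]
      have hlt : path.length - (k+1) < path.length := by omega
      have hdrop : path.drop (path.length - (k+1))
          = path[path.length - (k+1)] :: path.drop (path.length - k) := by
        rw [List.drop_eq_getElem_cons hlt,
          show path.length - (k+1) + 1 = path.length - k from by omega]
      have hlen : (path[path.length - (k+1)] :: path.drop (path.length - k)).length = k + 1 := by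
        simp
        omega
      by_cases hc : sp.take (k+1) = path.drop (path.length - (k+1))
      · have hc' : sp.take (k+1)
            = path[path.length - (k+1)] :: path.drop (path.length - k) := by
          rw [← hdrop]; exact hc
        rw [if_pos hc.symm]
        refine ⟨by omega, ?_⟩
        rw [show ((k:Int) + 1).toNat = k + 1 from by omega, hdrop]
        simp only [flsGo]
        rw [hlen, if_pos hc']
        exact hc'
      · rw [if_neg (fun h => hc h.symm)]
        refine ⟨ih0, ?_⟩
        rw [hdrop]
        simp only [flsGo]
        rw [hlen, if_neg (fun h => hc (by rw [hdrop]; exact h))]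
        exact ih1

-- ===== VERDICT (by name: the statement is the Claim_ definition above) =====
theorem find_longest_suffix_spec : Claim_equal_find_longest_suffix := by
  intro path sp _
  unfold Spec_find_longest_suffix find_longest_suffix find_longest_suffix_alt
  dsimp only
  set m : Nat := min path.length sp.length with hm
  have hmin : min ((sp.length : Int)) ((path.length : Int)) = (m : Int) := by
    omega
  rw [hmin]
  obtain ⟨h0, h1⟩ := fls_key path sp m (by omega) (by omega)
  rw [PySem.List.slice_to _ h0, h1]
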